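-- pv_equiv track=rewrite | github.com/shardulsemwal/compiler_design_project | app.py | redundant_expression
-- ===== SOURCE A (Python) =====
-- def redundant_expression(code):
--     expr_map = {}
--     warnings = []
--
--     for i, line in enumerate(code.split('\n'), start=1):
--         if '=' in line:
--             expr = line.split('=')[1].strip()
--             if expr in expr_map:
--                 warnings.append(f"Redundant expression at line {i}")
--             else:
--                 expr_map[expr] = i
--
--     return "\n".join(warnings) if warnings else "No redundant expressions"
-- ===== SOURCE B (Python) =====
-- def redundant_expression(code):
--     occ = {}
--     for i, line in enumerate(code.split('\n'), start=1):
--         if '=' in line: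
--             expr = line.split('=')[1].strip()
--             occ[expr] = occ.get(expr, []) + [i]
--     dups = sorted(i for lines in occ.values() for i in lines[1:])
--     if not dups:
--         return "No redundant expressions"
--     return "\n".join(f"Redundant expression at line {i}" for i in dups)
-- ===== Notes on version B (the rewrite author's own statement) =====
-- stated objective: alternative
-- what changed: A flags a duplicate RHS the moment it is seen in its single pass over the lines (seen-dict of first occurrences, warnings appended inline); B instead groups all occurrence line numbers per RHS expression in a first pass, then collects every occurrence after the first from each group and sorts the collected line numbers to restore line order before formatting.
import Mathlib
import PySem

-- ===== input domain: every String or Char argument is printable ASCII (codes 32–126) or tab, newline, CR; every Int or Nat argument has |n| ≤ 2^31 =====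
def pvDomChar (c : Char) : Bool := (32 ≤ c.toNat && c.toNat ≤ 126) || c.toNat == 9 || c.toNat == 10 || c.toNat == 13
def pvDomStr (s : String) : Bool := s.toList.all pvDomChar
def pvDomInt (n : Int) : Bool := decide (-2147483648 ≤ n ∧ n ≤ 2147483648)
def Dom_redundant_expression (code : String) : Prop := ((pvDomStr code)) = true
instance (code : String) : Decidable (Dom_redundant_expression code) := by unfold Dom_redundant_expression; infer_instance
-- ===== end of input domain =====

-- B replaces A's one-pass seen-dict with a grouping pass (expr → all line numbers) followed by a
-- collect-tails-and-sort pass; same return value, different decomposition (objective: alternative).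

-- shared helpers: both Pythons contain the identical sub-expressions
-- line.split('=')[1].strip()  and  f"Redundant expression at line {i}"
def pvExpr (line : String) : String :=
  PySem.Str.strip (PySem.List.pyGetD ((PySem.Str.split? line "=").getD []) 1 "")

def pvFmt (i : Int) : String := "Redundant expression at line " ++ PySem.Int.toStr i

-- ===== PORT A =====
-- loop body of A: expr_map lookup-or-record, warning appended in line order
def pvStepA (st : PySem.Dict String Int × List String) (p : Int × String) :
    PySem.Dict String Int × List String :=
  if PySem.Str.isIn "=" p.2 then
    let expr := pvExpr p.2
    if st.1.contains expr then
      (st.1, st.2 ++ [pvFmt p.1])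
    else
      (st.1.insert expr p.1, st.2)
  else st

def redundant_expression (code : String) : String :=
  let st := (PySem.List.enumerate ((PySem.Str.split? code "\n").getD []) 1).foldl
      pvStepA (PySem.Dict.empty, [])
  if st.2 ≠ [] then PySem.Str.join "\n" st.2 else "No redundant expressions"

-- ===== PORT B =====
-- loop body of B: group every occurrence line number under its expression
def pvStepB (d : PySem.Dict String (List Int)) (p : Int × String) :
    PySem.Dict String (List Int) :=
  if PySem.Str.isIn "=" p.2 then
    let expr := pvExpr p.2
    d.insert expr (d.getD expr [] ++ [p.1])
  else d

def redundant_expression_alt (code : String) : String :=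
  let occ := (PySem.List.enumerate ((PySem.Str.split? code "\n").getD []) 1).foldl
      pvStepB PySem.Dict.empty
  let dups := PySem.List.sorted (occ.values.flatMap (fun l => l.drop 1)) (fun x => x) false
  if dups.isEmpty then "No redundant expressions"
  else PySem.Str.join "\n" (dups.map pvFmt)

-- ===== PRECONDITION & SPEC =====
def Spec_redundant_expression (code : String) (out : String) : Prop := out = redundant_expression_alt code
instance (code : String) (out : String) : Decidable (Spec_redundant_expression code out) := by unfold Spec_redundant_expression; infer_instance

-- ===== CLAIM (what is proved, stated in full; the proofs are below) =====
def Claim_equal_redundant_expression : Prop := ∀ (code : String), Dom_redundant_expression code → Spec_redundant_expression code (redundant_expression code)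

-- ===== LEMMAS AND PROOFS =====

theorem pv_tails_sublist (vs : List (List Int)) :
    List.Sublist (vs.flatMap (fun l => l.drop 1)) (vs.flatMap (fun l => l)) := by
  induction vs with
  | nil => simp
  | cons v vs ih => simpa using List.Sublist.append (List.drop_sublist 1 v) ih

theorem pv_map_upd_id (L : List (String × List Int)) (e : String) (v : List Int)
    (h : ∀ p ∈ L, p.1 ≠ e) :
    L.map (fun p => if p.1 == e then (e, v) else p) = L := by
  induction L with
  | nil => rfl
  | cons p L ih =>
    simp only [List.map_cons]
    rw [if_neg (by simpa using h p (by simp)), ih (fun p hp => h p (by simp [hp]))]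

theorem pv_invariant (P : List (Int × String))
    (hP : P.Pairwise (fun p q => p.1 < q.1)) :
    (∀ e : String,
        (P.foldl pvStepA (PySem.Dict.empty, [])).1.contains e
          = (P.foldl pvStepB PySem.Dict.empty).contains e) ∧
    (P.foldl pvStepB PySem.Dict.empty).keys.Nodup ∧
    (∀ p ∈ (P.foldl pvStepB PySem.Dict.empty).items, p.2 ≠ ([] : List Int)) ∧
    ((P.foldl pvStepB PySem.Dict.empty).values.flatMap (fun l => l)).Perm
        ((P.filter (fun p => PySem.Str.isIn "=" p.2)).map (·.1)) ∧
    (P.foldl pvStepA (PySem.Dict.empty, [])).2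
      = (PySem.List.sorted
          ((P.foldl pvStepB PySem.Dict.empty).values.flatMap (fun l => l.drop 1))
          (fun x => x) false).map pvFmt := by
  induction P using List.reverseRecOn with
  | nil =>
    refine ⟨fun e => rfl, ?_, ?_, ?_, ?_⟩ <;>
      simp [PySem.Dict.empty, PySem.Dict.keys, PySem.Dict.values, PySem.List.sorted]
  | append_singleton P q ih =>
    rw [List.pairwise_append] at hP
    obtain ⟨hP1, -, hlt⟩ := hP
    obtain ⟨ih1, ih2, ih3, ih4, ih5⟩ := ih hP1
    obtain ⟨i, line⟩ := q
    simp only [List.foldl_append, List.foldl_cons, List.foldl_nil] at *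
    set mA := P.foldl pvStepA (PySem.Dict.empty, []) with hmA
    set d := P.foldl pvStepB PySem.Dict.empty with hd
    by_cases hg : PySem.Chars.isIn ['='] line.toList = true
    · by_cases hc : d.contains (pvExpr line) = true
      · -- duplicate expression: A appends a warning, B extends the stored list
        have hcA : mA.1.contains (pvExpr line) = true := by rw [ih1]; exact hc
        have hstA : pvStepA mA (i, line) = (mA.1, mA.2 ++ [pvFmt i]) := by
          simp [pvStepA, hg, hcA]
        obtain ⟨p, hpmem, hpe⟩ : ∃ p ∈ d.items, p.1 = pvExpr line := by
          have h := hc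
          simp only [PySem.Dict.contains, List.any_eq_true, beq_iff_eq] at h
          exact h
        have hmem : (pvExpr line, p.2) ∈ d.items := by
          have : p = (pvExpr line, p.2) := by rw [← hpe]
          rwa [this] at hpmem
        have hget : d.get? (pvExpr line) = some p.2 :=
          PySem.Dict.get?_of_mem_items d hmem ih2
        have hgetD : d.getD (pvExpr line) [] = p.2 := by
          rw [PySem.Dict.getD_eq_get?_getD, hget]; rfl
        have hstB : pvStepB d (i, line) = d.insert (pvExpr line) (p.2 ++ [i]) := by
          simp [pvStepB, hg, hgetD]
        have hlne : p.2 ≠ ([] : List Int) := ih3 _ hpmem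
        obtain ⟨L₁, L₂, hsplit⟩ := List.append_of_mem hmem
        have hkeys : d.keys = L₁.map Prod.fst ++ pvExpr line :: L₂.map Prod.fst := by
          simp [PySem.Dict.keys, hsplit]
        have hnd := ih2
        rw [hkeys, List.nodup_append] at hnd
        have hne₁ : ∀ r ∈ L₁, r.1 ≠ pvExpr line := by
          intro r hr hre
          have h1 : r.1 ∈ L₁.map Prod.fst := List.mem_map_of_mem hr
          have h2 : r.1 ∈ pvExpr line :: L₂.map Prod.fst := by simp [hre]
          exact hnd.2.2 r.1 h1 r.1 h2 rfl
        have hne₂ : ∀ r ∈ L₂, r.1 ≠ pvExpr line := by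
          intro r hr hre
          have h0 := hnd.2.1
          rw [List.nodup_cons] at h0
          have h1 : r.1 ∈ L₂.map Prod.fst := List.mem_map_of_mem hr
          rw [hre] at h1
          exact h0.1 h1
        have hitems' : (d.insert (pvExpr line) (p.2 ++ [i])).items
            = L₁ ++ (pvExpr line, p.2 ++ [i]) :: L₂ := by
          rw [PySem.Dict.items_insert_of_contains d _ hc, hsplit]
          simp only [List.map_append, List.map_cons]
          rw [pv_map_upd_id L₁ _ _ hne₁, pv_map_upd_id L₂ _ _ hne₂]
          simp
        have hvals : d.values = L₁.map Prod.snd ++ p.2 :: L₂.map Prod.snd := by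
          simp [PySem.Dict.values, hsplit]
        have hvals' : (d.insert (pvExpr line) (p.2 ++ [i])).values
            = L₁.map Prod.snd ++ (p.2 ++ [i]) :: L₂.map Prod.snd := by
          simp [PySem.Dict.values, hitems']
        -- the full multiset of stored indices gains i
        have hfull : ((d.insert (pvExpr line) (p.2 ++ [i])).values.flatMap (fun l => l)).Perm
            ((d.values.flatMap (fun l => l)) ++ [i]) := by
          rw [hvals, hvals']
          simp only [List.flatMap_append, List.flatMap_cons]
          simp only [List.perm_iff_count, List.count_append]
          intro a
          by_cases h : a = i <;> simp [h, List.count_cons] <;> omega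
        -- the multiset of redundant indices gains i as well
        have htails : ((d.insert (pvExpr line) (p.2 ++ [i])).values.flatMap (fun l => l.drop 1)).Perm
            ((d.values.flatMap (fun l => l.drop 1)) ++ [i]) := by
          rw [hvals, hvals']
          simp only [List.flatMap_append, List.flatMap_cons]
          rw [List.drop_append_of_le_length (List.length_pos_of_ne_nil hlne)]
          simp only [List.perm_iff_count, List.count_append]
          intro a
          by_cases h : a = i <;> simp [h, List.count_cons] <;> omega
        -- every index already stored is smaller than i
        have hsmall : ∀ x ∈ d.values.flatMap (fun l => l), x < i := by
          intro x hx
          have hx' : x ∈ (P.filter (fun r => PySem.Str.isIn "=" r.2)).map (·.1) :=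
            ih4.mem_iff.mp hx
          obtain ⟨r, hr, hrx⟩ := List.mem_map.mp hx'
          have hrP : r ∈ P := List.mem_of_mem_filter hr
          have := hlt r hrP (i, line) (by simp)
          omega
        -- the full multiset is duplicate-free
        have hndP : ((P.filter (fun r => PySem.Str.isIn "=" r.2)).map (·.1)).Nodup := by
          have h1 : (P.map (·.1)).Nodup := by
            have hp : List.Pairwise (fun a b => a ≠ b) (P.map (·.1)) := by
              rw [List.pairwise_map]
              exact hP1.imp (fun h => ne_of_lt h)
            exact hp
          exact h1.sublist ((P.filter_sublist).map _)
        have hndfull : (d.values.flatMap (fun l => l)).Nodup :=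
          (ih4.nodup_iff).mpr hndP
        have hndT : (d.values.flatMap (fun l => l.drop 1)).Nodup :=
          hndfull.sublist (pv_tails_sublist d.values)
        -- name the sorted list: appending i keeps it sorted
        have hsorted : PySem.List.sorted
              ((d.insert (pvExpr line) (p.2 ++ [i])).values.flatMap (fun l => l.drop 1))
              (fun x => x) false
            = PySem.List.sorted (d.values.flatMap (fun l => l.drop 1)) (fun x => x) false
              ++ [i] := by
          apply PySem.List.sorted_eq_of_perm_of_pairwise_lt
          · exact (List.Perm.append (PySem.List.sorted_perm _ _ _) (List.Perm.refl [i])).trans htails.symm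
          · rw [List.pairwise_append]
            refine ⟨?_, by simp, ?_⟩
            · have hle := PySem.List.sorted_pairwise (d.values.flatMap (fun l => l.drop 1)) (fun x => x)
              have hnds : (PySem.List.sorted (d.values.flatMap (fun l => l.drop 1)) (fun x => x) false).Nodup :=
                (List.Perm.nodup_iff (PySem.List.sorted_perm _ _ _)).mpr hndT
              exact (hle.and hnds).imp (fun h => lt_of_le_of_ne h.1 h.2)
            · intro x hx y hy
              have hxT : x ∈ d.values.flatMap (fun l => l.drop 1) :=
                (List.Perm.mem_iff (PySem.List.sorted_perm _ _ _)).mp hx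
              have hxfull : x ∈ d.values.flatMap (fun l => l) :=
                (pv_tails_sublist d.values).mem hxT
              have := hsmall x hxfull
              simp only [List.mem_singleton] at hy
              omega
        rw [hstA, hstB]
        refine ⟨?_, ?_, ?_, ?_, ?_⟩
        · intro e'
          rw [PySem.Dict.contains_insert]
          by_cases he' : e' = pvExpr line
          · subst he'; simp [hcA, hc]
          · simp [he', ih1]
        · have hk : (d.insert (pvExpr line) (p.2 ++ [i])).keys = d.keys := by
            simp [PySem.Dict.keys, hitems', hsplit]
          rw [hk]; exact ih2
        · intro r hr
          rw [hitems'] at hr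
          rcases List.mem_append.mp hr with h | h
          · exact ih3 r (by rw [hsplit]; exact List.mem_append_left _ h)
          · rcases List.mem_cons.mp h with h | h
            · subst h; simp
            · exact ih3 r (by rw [hsplit]; exact List.mem_append_right _ (List.mem_cons_of_mem _ h))
        · refine (hfull.trans (ih4.append (List.Perm.refl [i]))).trans ?_
          simp [hg, List.filter_append]
        · rw [hsorted]
          simp only [List.map_append]
          rw [← ih5]
          rfl
      · -- new expression: A records it, B starts its occurrence list
        have hcA : mA.1.contains (pvExpr line) = false := by
          rw [ih1]; exact Bool.not_eq_true _ ▸ (by simpa using hc)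
        have hstA : pvStepA mA (i, line) = (mA.1.insert (pvExpr line) i, mA.2) := by
          simp [pvStepA, hg, hcA]
        have hgetD : d.getD (pvExpr line) [] = [] :=
          PySem.Dict.getD_of_not_contains d _ (by simpa using hc)
        have hstB : pvStepB d (i, line) = d.insert (pvExpr line) [i] := by
          simp [pvStepB, hg, hgetD]
        have hitems' : (d.insert (pvExpr line) [i]).items
            = d.items ++ [(pvExpr line, [i])] :=
          PySem.Dict.items_insert_of_not_contains d _ (by simpa using hc)
        have hvals' : (d.insert (pvExpr line) [i]).values = d.values ++ [[i]] := by
          simp [PySem.Dict.values, hitems']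
        rw [hstA, hstB]
        refine ⟨?_, ?_, ?_, ?_, ?_⟩
        · intro e'
          rw [PySem.Dict.contains_insert, PySem.Dict.contains_insert, ih1]
        · exact PySem.Dict.nodup_keys_insert d _ _ ih2
        · intro r hr
          rw [hitems'] at hr
          rcases List.mem_append.mp hr with h | h
          · exact ih3 r h
          · simp only [List.mem_singleton] at h
            subst h; simp
        · rw [hvals']
          simp only [List.flatMap_append, List.flatMap_cons, List.flatMap_nil]
          refine (ih4.append (List.Perm.refl [i])).trans ?_
          simp [hg, List.filter_append]
        · rw [hvals']
          simp only [List.flatMap_append, List.flatMap_cons, List.flatMap_nil, List.append_nil]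
          simpa using ih5
    · have hgB : PySem.Str.isIn "=" line = false := by
        simp [PySem.Str.isIn_eq]; simpa using hg
      refine ⟨?_, ?_, ?_, ?_, ?_⟩ <;>
        simp only [pvStepA, pvStepB, hgB, Bool.false_eq_true, if_false, List.filter_append]
      · exact ih1
      · exact ih2
      · exact ih3
      · simpa [List.filter_cons, hg] using ih4
      · exact ih5

theorem pv_assemble (w : List String) (dups : List Int)
    (h : w = dups.map pvFmt) :
    (if w ≠ [] then PySem.Str.join "\n" w else "No redundant expressions")
      = (if dups.isEmpty then "No redundant expressions"
         else PySem.Str.join "\n" (dups.map pvFmt)) := by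
  subst h; cases dups <;> simp

-- ===== VERDICT (by name: the statement is the Claim_ definition above) =====
theorem redundant_expression_spec : Claim_equal_redundant_expression := by
  intro code _
  unfold Spec_redundant_expression redundant_expression redundant_expression_alt
  obtain ⟨_, _, _, _, h5⟩ :=
    pv_invariant (PySem.List.enumerate ((PySem.Str.split? code "\n").getD []) 1)
      (PySem.List.pairwise_lt_enumerate _ _)
  exact pv_assemble _ _ h5
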